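-- pv_equiv track=rewrite | github.com/mitesh1112/smallpy | LCMHCF.py | allfacts
-- ===== SOURCE A (Python) =====
-- def allfacts(n):
--     d = 2
--     f = []
--     a = 0
--     while d <= n:
--         if(a > 0 and d > a):
--             break
--
--         if n % d == 0:
--             f.append(d)
--             if a == 0:
--                 a = n // d
--         d = d + 1
--
--     f.insert(0, 1)
--     f.append(n)
--
--     return f
-- ===== SOURCE B (Python) =====
-- def allfacts(n):
--     # Integer square root by incrementing r, then divisors as two comprehensions:
--     # small divisors up to sqrt(n), large ones as cofactors of the small ones.
--     r = 1
--     while (r + 1) * (r + 1) <= n: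
--         r = r + 1
--     small = [d for d in range(2, r + 1) if n % d == 0]
--     large = [n // d for d in reversed(small) if d * d != n]
--     return [1] + small + large + [n]
-- ===== Notes on version B (the rewrite author's own statement) =====
-- stated objective: alternative
-- what changed: Replaces A's linear scan of candidate divisors with an incremental integer-sqrt computation followed by two comprehensions: small divisors filtered from range(2, isqrt(n)+1) and large divisors emitted as cofactors of the small ones in reverse.
-- intended difference: For prime inputs n >= 2, A returns [1, n, n] (its loop finds n itself and n is appended again unconditionally) while B returns [1, n]; a divisor list should contain n once. — e.g. on allfacts(5): A returns [1, 5, 5], B returns [1, 5]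
import Mathlib
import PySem

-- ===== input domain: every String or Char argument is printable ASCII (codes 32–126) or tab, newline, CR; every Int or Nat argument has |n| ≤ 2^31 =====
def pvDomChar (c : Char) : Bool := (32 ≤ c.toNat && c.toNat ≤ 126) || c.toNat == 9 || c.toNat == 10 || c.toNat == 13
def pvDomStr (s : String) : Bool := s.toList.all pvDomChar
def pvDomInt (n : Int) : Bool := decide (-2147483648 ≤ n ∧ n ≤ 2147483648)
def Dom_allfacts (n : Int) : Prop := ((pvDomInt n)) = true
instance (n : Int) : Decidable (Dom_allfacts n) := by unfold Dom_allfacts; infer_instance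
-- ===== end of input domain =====

-- B replaces A's linear divisor scan by an incremental integer square root followed by
-- two comprehensions over range(2, isqrt(n)+1): small divisors by filtering, large ones
-- as cofactors of the small ones in reverse order.

-- ===== PORT A =====
-- A's while-loop: state (d, f, a); break (returning f) when a > 0 and d > a.
-- fuel = (n + 1 - d).toNat is a pure totality guard: it never runs out before
-- the loop condition d ≤ n fails.
def allfactsLoop (fuel : Nat) (n d : Int) (f : List Int) (a : Int) : List Int :=
  match fuel with
  | 0 => f
  | fuel + 1 =>
    if d ≤ n then
      if a > 0 ∧ d > a then f
      else if PySem.Int.mod n d = 0 then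
        allfactsLoop fuel n (d + 1) (f ++ [d]) (if a = 0 then PySem.Int.floordiv n d else a)
      else
        allfactsLoop fuel n (d + 1) f a
    else f

def allfacts (n : Int) : List Int :=
  let f := allfactsLoop (n + 1 - 2).toNat n 2 [] 0
  ([1] ++ f) ++ [n]

-- ===== PORT B =====
-- B's first loop: r = 1; while (r+1)*(r+1) <= n: r += 1.  fuel = n.toNat is a pure
-- totality guard: it never runs out before the loop condition fails.
def isqrtLoop (fuel : Nat) (n r : Int) : Int :=
  match fuel with
  | 0 => r
  | fuel + 1 => if (r + 1) * (r + 1) ≤ n then isqrtLoop fuel n (r + 1) else r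

def allfacts_alt (n : Int) : List Int :=
  let r := isqrtLoop n.toNat n 1
  let small := (PySem.List.pyRange 2 (r + 1) 1).filter (fun d => PySem.Int.mod n d = 0)
  let large := (small.reverse.filter (fun d => ¬ d * d = n)).map (fun d => PySem.Int.floordiv n d)
  (([1] ++ small) ++ large) ++ [n]

-- ===== PRECONDITION & SPEC =====
-- For prime n ≥ 2, A returns [1, n, n] (the loop finds n itself and n is also appended
-- unconditionally) while B returns [1, n]; the intended divisor list lists n once.
def D_allfacts (n : Int) : Prop := 2 ≤ n ∧ Nat.Prime n.toNat
instance (n : Int) : Decidable (D_allfacts n) := by unfold D_allfacts; infer_instance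

def Spec_allfacts (n : Int) (out : List Int) : Prop := ¬ D_allfacts n → out = allfacts_alt n
instance (n : Int) (out : List Int) : Decidable (Spec_allfacts n out) := by unfold Spec_allfacts; infer_instance

def pvDiffWitness_allfacts : Int := 5
def pvDiffWitnessOut_allfacts : (List Int) × (List Int) := ([1, 5, 5], [1, 5])

-- ===== CLAIM (what is proved, stated in full; the proofs are below) =====
def Claim_unchanged_allfacts : Prop := ∀ (n : Int), Dom_allfacts n → Spec_allfacts n (allfacts n)
def Claim_changed_allfacts : Prop := Dom_allfacts (pvDiffWitness_allfacts) ∧ D_allfacts (pvDiffWitness_allfacts) ∧ allfacts (pvDiffWitness_allfacts) = pvDiffWitnessOut_allfacts.1 ∧ allfacts_alt (pvDiffWitness_allfacts) = pvDiffWitnessOut_allfacts.2 ∧ pvDiffWitnessOut_allfacts.1 ≠ pvDiffWitnessOut_allfacts.2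
def Claim_exact_allfacts : Prop := ∀ (n : Int), Dom_allfacts n → D_allfacts n → allfacts n ≠ allfacts_alt n

-- ===== LEMMAS AND PROOFS =====

-- The ascending list of divisors of n in [lo, hi].
def divsIn (n lo hi : Int) : List Int :=
  (PySem.List.pyRange lo (hi + 1) 1).filter (fun x => PySem.Int.mod n x = 0)

theorem mem_divsIn {n lo hi x : Int} :
    x ∈ divsIn n lo hi ↔ lo ≤ x ∧ x ≤ hi ∧ PySem.Int.mod n x = 0 := by
  simp [divsIn, List.mem_filter, PySem.List.mem_pyRange_one]
  omega

theorem pairwise_divsIn (n lo hi : Int) : (divsIn n lo hi).Pairwise (· < ·) :=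
  List.Pairwise.filter _ (PySem.List.pairwise_lt_pyRange_one lo (hi + 1))

theorem divsIn_nil {n lo hi : Int} (h : hi < lo) : divsIn n lo hi = [] := by
  simp [divsIn, PySem.List.pyRange_one_eq_nil (by omega : (hi + 1 : Int) ≤ lo)]

theorem divsIn_cons {n lo hi : Int} (h : lo ≤ hi) :
    divsIn n lo hi =
      (if PySem.Int.mod n lo = 0 then [lo] else []) ++ divsIn n (lo + 1) hi := by
  rw [divsIn, PySem.List.pyRange_one_cons (by omega : lo < hi + 1)]
  by_cases hd : PySem.Int.mod n lo = 0 <;> simp [List.filter, hd, divsIn]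

-- accumulator generalization for A's loop
theorem allfactsLoop_acc (k : Nat) : ∀ (n d a : Int) (f : List Int),
    allfactsLoop k n d f a = f ++ allfactsLoop k n d [] a := by
  induction k with
  | zero => intro n d a f; simp [allfactsLoop]
  | succ k ih =>
    intro n d a f
    simp only [allfactsLoop]
    by_cases h1 : d ≤ n
    · simp only [if_pos h1]
      by_cases h2 : a > 0 ∧ d > a
      · simp [h2]
      · simp only [if_neg h2]
        by_cases h3 : PySem.Int.mod n d = 0
        · simp only [if_pos h3, List.nil_append]
          rw [ih n (d+1) _ (f ++ [d]), ih n (d+1) _ ([d])]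
          simp
        · simp only [if_neg h3]
          rw [ih n (d+1) a f]
    · simp [h1]

-- A's loop after a has been set: it collects the divisors in [d, a]
theorem allfactsLoop_pos (k : Nat) : ∀ (n d a : Int), (n + 1 - d).toNat = k →
    0 < a → a ≤ n → allfactsLoop k n d [] a = divsIn n d a := by
  induction k with
  | zero =>
    intro n d a hk ha han
    rw [divsIn_nil (by omega), allfactsLoop]
  | succ k ih =>
    intro n d a hk ha han
    have h1 : d ≤ n := by omega
    simp only [allfactsLoop, if_pos h1]
    by_cases h2 : a > 0 ∧ d > a
    · rw [divsIn_nil (by omega)]; simp [h2]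
    · have hda : d ≤ a := by omega
      simp only [if_neg h2]
      by_cases h3 : PySem.Int.mod n d = 0
      · simp only [if_pos h3, if_neg (by omega : ¬ a = 0), List.nil_append]
        rw [allfactsLoop_acc k n (d+1) a [d],
            ih n (d+1) a (by omega) ha han, divsIn_cons hda, if_pos h3]
      · simp only [if_neg h3]
        rw [ih n (d+1) a (by omega) ha han, divsIn_cons hda, if_neg h3]
        simp

-- A's loop before a is set, scanning up to the least divisor p of n
theorem allfactsLoop_zero (p : Int) {n : Int} (hp2 : 2 ≤ p) (hpn : p ≤ n)
    (hpd : PySem.Int.mod n p = 0)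
    (hmin : ∀ x, 2 ≤ x → x < p → PySem.Int.mod n x ≠ 0) :
    ∀ (j k : Nat) (d : Int), (p - d).toNat = j → (n + 1 - d).toNat = k → 2 ≤ d → d ≤ p →
      allfactsLoop k n d [] 0 =
        p :: allfactsLoop (n - p).toNat n (p + 1) [] (PySem.Int.floordiv n p) := by
  intro j
  induction j with
  | zero =>
    intro k d hj hk hd2 hdp
    have hde : d = p := by omega
    subst hde
    obtain ⟨k', rfl⟩ : ∃ k', k = k' + 1 := ⟨k - 1, by omega⟩
    simp only [allfactsLoop, if_pos (by omega : d ≤ n),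
      if_neg (by omega : ¬ ((0:Int) > 0 ∧ d > 0)), if_pos hpd,
      List.nil_append]
    rw [allfactsLoop_acc k' n (d+1) _ [d], show k' = (n - d).toNat by omega]
    simp
  | succ j ih =>
    intro k d hj hk hd2 hdp
    have hlt : d < p := by omega
    obtain ⟨k', rfl⟩ : ∃ k', k = k' + 1 := ⟨k - 1, by omega⟩
    simp only [allfactsLoop, if_pos (by omega : d ≤ n),
      if_neg (by omega : ¬ ((0:Int) > 0 ∧ d > 0)), if_neg (hmin d hd2 hlt)]
    exact ih k' (d + 1) (by omega) (by omega) (by omega) (by omega)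

-- B's isqrt loop: specification
theorem isqrtLoop_spec (n : Int) (fuel : Nat) : ∀ r : Int, 1 ≤ r → (r = 1 ∨ r * r ≤ n) →
    n < (r + fuel + 1) * (r + fuel + 1) →
    1 ≤ isqrtLoop fuel n r ∧ (isqrtLoop fuel n r = 1 ∨ isqrtLoop fuel n r * isqrtLoop fuel n r ≤ n) ∧
      n < (isqrtLoop fuel n r + 1) * (isqrtLoop fuel n r + 1) := by
  induction fuel with
  | zero =>
    intro r h1 h2 h3
    simp only [isqrtLoop]
    exact ⟨h1, h2, by norm_num at h3; exact h3⟩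
  | succ fuel ih =>
    intro r h1 h2 h3
    simp only [isqrtLoop]
    by_cases hc : (r + 1) * (r + 1) ≤ n
    · rw [if_pos hc]
      refine ih (r + 1) (by omega) (Or.inr hc) ?_
      have he : r + 1 + (fuel : Int) + 1 = r + ((fuel : Nat) + 1 : Nat) + 1 := by push_cast; ring
      rw [he]
      exact h3
    · rw [if_neg hc]
      exact ⟨h1, h2, by omega⟩

theorem isqrt_spec (n : Int) :
    1 ≤ isqrtLoop n.toNat n 1 ∧
      (isqrtLoop n.toNat n 1 = 1 ∨ isqrtLoop n.toNat n 1 * isqrtLoop n.toNat n 1 ≤ n) ∧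
      n < (isqrtLoop n.toNat n 1 + 1) * (isqrtLoop n.toNat n 1 + 1) := by
  apply isqrtLoop_spec n n.toNat 1 le_rfl (Or.inl rfl)
  by_cases hn : 0 ≤ n
  · have : ((n.toNat : Int)) = n := Int.toNat_of_nonneg hn
    nlinarith [this]
  · have : n.toNat = 0 := Int.toNat_of_nonpos (by omega)
    rw [this]
    push_cast
    omega

-- membership characterization of B's small-divisor list
theorem mem_small (n x : Int) :
    x ∈ (PySem.List.pyRange 2 (isqrtLoop n.toNat n 1 + 1) 1).filter
          (fun d => PySem.Int.mod n d = 0) ↔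
      2 ≤ x ∧ x * x ≤ n ∧ PySem.Int.mod n x = 0 := by
  obtain ⟨hr1, hrsq, hrup⟩ := isqrt_spec n
  have h := mem_divsIn (n := n) (lo := 2) (hi := isqrtLoop n.toNat n 1) (x := x)
  rw [divsIn] at h
  rw [h]
  constructor
  · rintro ⟨h1, h2, h3⟩
    refine ⟨h1, ?_, h3⟩
    rcases hrsq with he | he
    · omega
    · nlinarith
  · rintro ⟨h1, h2, h3⟩
    refine ⟨h1, ?_, h3⟩
    nlinarith

-- B-loop: tail form and characterizations
theorem small_pairwise (n : Int) :
    ((PySem.List.pyRange 2 (isqrtLoop n.toNat n 1 + 1) 1).filter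
      (fun d => PySem.Int.mod n d = 0)).Pairwise (· < ·) :=
  pairwise_divsIn n 2 (isqrtLoop n.toNat n 1)

-- strictly sorted lists with the same members are equal
theorem sorted_lt_ext : ∀ (l₁ l₂ : List Int), l₁.Pairwise (· < ·) → l₂.Pairwise (· < ·) →
    (∀ x, x ∈ l₁ ↔ x ∈ l₂) → l₁ = l₂ := by
  intro l₁
  induction l₁ with
  | nil =>
    intro l₂ _ _ hm
    cases l₂ with
    | nil => rfl
    | cons b t => exact absurd ((hm b).mpr (List.mem_cons_self)) (by simp)
  | cons a t₁ ih =>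
    intro l₂ h₁ h₂ hm
    cases l₂ with
    | nil => exact absurd ((hm a).mp List.mem_cons_self) (by simp)
    | cons b t₂ =>
      have hab : a = b := by
        have ha : a ∈ b :: t₂ := (hm a).mp List.mem_cons_self
        have hb : b ∈ a :: t₁ := (hm b).mpr List.mem_cons_self
        rcases List.mem_cons.mp ha with h | h
        · exact h
        · rcases List.mem_cons.mp hb with h' | h'
          · exact h'.symm
          · have := (List.pairwise_cons.mp h₂).1 a h
            have := (List.pairwise_cons.mp h₁).1 b h'
            omega
      subst hab
      have ht : t₁ = t₂ := by
        apply ih t₂ (List.pairwise_cons.mp h₁).2 (List.pairwise_cons.mp h₂).2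
        intro x
        constructor
        · intro hx
          have hxa : a < x := (List.pairwise_cons.mp h₁).1 x hx
          rcases List.mem_cons.mp ((hm x).mp (List.mem_cons_of_mem _ hx)) with h | h
          · omega
          · exact h
        · intro hx
          have hxa : a < x := (List.pairwise_cons.mp h₂).1 x hx
          rcases List.mem_cons.mp ((hm x).mpr (List.mem_cons_of_mem _ hx)) with h | h
          · omega
          · exact h
      rw [ht]

-- product form of floordiv on exact divisors
theorem floordiv_mul_of_dvd {n e : Int} (he : 0 < e) (hd : e ∣ n) :
    PySem.Int.floordiv n e * e = n := by
  rw [PySem.Int.floordiv_eq_ediv_of_pos he]; exact Int.ediv_mul_cancel hd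

-- the small-n case: A's loop collects nothing and B's small list is empty
theorem small_case {n : Int} (hn : n ≤ 1) : allfacts n = allfacts_alt n := by
  have h1 : allfactsLoop (n + 1 - 2).toNat n 2 [] 0 = [] := by
    rw [show (n + 1 - 2).toNat = 0 by omega]; rfl
  have h2 : ∀ x, ¬ (2 ≤ x ∧ x * x ≤ n ∧ PySem.Int.mod n x = 0) := by
    rintro x ⟨hx2, hxsq, -⟩; nlinarith
  have h3 : (PySem.List.pyRange 2 (isqrtLoop n.toNat n 1 + 1) 1).filter
      (fun d => PySem.Int.mod n d = 0) = [] := by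
    rw [List.eq_nil_iff_forall_not_mem]
    intro x hx
    exact h2 x ((mem_small n x).mp hx)
  simp [allfacts, allfacts_alt, h1, h3]

-- the composite case: both sides are the sorted list of divisors of n in [1, n]
theorem composite_case {n : Int} (hn2 : 2 ≤ n) (hnp : ¬ Nat.Prime n.toNat) :
    allfacts n = allfacts_alt n := by
  have htn : ((n.toNat : Int)) = n := Int.toNat_of_nonneg (by omega)
  have hne1 : n.toNat ≠ 1 := by omega
  have hPp := Nat.minFac_prime hne1
  set P : Int := (n.toNat.minFac : Int) with hPdef
  have hP2 : (2:Int) ≤ P := by rw [hPdef]; exact_mod_cast hPp.two_le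
  have hPdvd : P ∣ n := by
    rw [hPdef]
    have h := Int.natCast_dvd_natCast.mpr (Nat.minFac_dvd n.toNat)
    rwa [htn] at h
  have hPsq : P * P ≤ n := by
    rw [hPdef]
    have h := Nat.minFac_sq_le_self (by omega : 0 < n.toNat) hnp
    rw [pow_two] at h
    have h2 := Int.ofNat_le.mpr h
    push_cast at h2
    rwa [htn] at h2
  -- minimality of P among divisors ≥ 2
  have hPle : ∀ x : Int, 2 ≤ x → x ∣ n → P ≤ x := by
    intro x hx2 hxd
    have hx : (x.toNat : Int) ∣ (n.toNat : Int) := by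
      rwa [Int.toNat_of_nonneg (by omega : (0:Int) ≤ x), htn]
    have := Nat.minFac_le_of_dvd (by omega) (Int.natCast_dvd_natCast.mp hx)
    omega
  have hmin : ∀ x : Int, 2 ≤ x → x < P → PySem.Int.mod n x ≠ 0 := by
    intro x hx2 hxP hmod
    have := hPle x hx2 ((PySem.Int.mod_eq_zero_iff_dvd n x).mp hmod)
    omega
  set m := PySem.Int.floordiv n P with hmdef
  have hmP : m * P = n := floordiv_mul_of_dvd (by omega) hPdvd
  have hPm : P ≤ m := by nlinarith
  have hm2 : 2 ≤ m := by omega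
  have hmlt : m < n := by nlinarith
  -- A's loop result
  have hPmod : PySem.Int.mod n P = 0 := (PySem.Int.mod_eq_zero_iff_dvd n P).mpr hPdvd
  have hA : allfactsLoop (n + 1 - 2).toNat n 2 [] 0 = P :: divsIn n (P + 1) m := by
    rw [allfactsLoop_zero P hP2 (by omega) hPmod hmin
          (P - 2).toNat (n + 1 - 2).toNat 2 rfl rfl (by omega) hP2,
        allfactsLoop_pos (n - P).toNat n (P + 1) m (by omega) (by omega) (by omega)]
  have hA2 : divsIn n 2 m = P :: divsIn n (P + 1) m := by
    apply sorted_lt_ext _ _ (pairwise_divsIn n 2 m)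
    · rw [List.pairwise_cons]
      refine ⟨fun y hy => ?_, pairwise_divsIn n (P+1) m⟩
      have := (mem_divsIn.mp hy).1
      omega
    · intro x
      rw [mem_divsIn, List.mem_cons, mem_divsIn]
      constructor
      · rintro ⟨h1, h2, h3⟩
        by_cases hxP : x = P
        · exact Or.inl hxP
        · have := hPle x h1 ((PySem.Int.mod_eq_zero_iff_dvd n x).mp h3)
          exact Or.inr ⟨by omega, h2, h3⟩
      · rintro (rfl | ⟨h1, h2, h3⟩)
        · exact ⟨hP2, hPm, hPmod⟩
        · exact ⟨by omega, h2, h3⟩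
  -- B's small-divisor list
  set S := (PySem.List.pyRange 2 (isqrtLoop n.toNat n 1 + 1) 1).filter
      (fun d => PySem.Int.mod n d = 0) with hSdef
  have hSmem : ∀ x, x ∈ S ↔ 2 ≤ x ∧ x * x ≤ n ∧ PySem.Int.mod n x = 0 := mem_small n
  have hSpair : S.Pairwise (· < ·) := small_pairwise n
  set R := S.reverse.filter (fun e => decide (¬ e * e = n)) with hRdef
  have hRmem : ∀ e, e ∈ R ↔ 2 ≤ e ∧ e * e < n ∧ e ∣ n := by
    intro e
    rw [hRdef, List.mem_filter, List.mem_reverse, hSmem e]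
    simp only [decide_not, Bool.not_eq_eq_eq_not, Bool.not_true, decide_eq_false_iff_not]
    rw [PySem.Int.mod_eq_zero_iff_dvd]
    constructor
    · rintro ⟨⟨h1, h2, h3⟩, h4⟩; exact ⟨h1, lt_of_le_of_ne h2 h4, h3⟩
    · rintro ⟨h1, h2, h3⟩; exact ⟨⟨h1, le_of_lt h2, h3⟩, ne_of_lt h2⟩
  have hRpair : R.Pairwise (· > ·) := List.Pairwise.filter _ hSpair.reverse
  set L := R.map (fun e => PySem.Int.floordiv n e) with hLdef
  -- facts about cofactors
  have hcof : ∀ e, e ∈ R → 2 ≤ PySem.Int.floordiv n e ∧ e < PySem.Int.floordiv n e ∧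
      PySem.Int.floordiv n e ∣ n ∧ PySem.Int.floordiv n e ≤ m ∧
      PySem.Int.floordiv n e * e = n := by
    intro e he
    obtain ⟨he2, hesq, hed⟩ := (hRmem e).mp he
    have hprod : PySem.Int.floordiv n e * e = n := floordiv_mul_of_dvd (by omega) hed
    set y := PySem.Int.floordiv n e with hydef
    have hy0 : 0 < y := by nlinarith
    have hey : e < y := by nlinarith
    have hyd : y ∣ n := ⟨e, hprod.symm⟩
    have hPe : P ≤ e := hPle e he2 hed
    have hym : y ≤ m := by nlinarith
    exact ⟨by omega, hey, hyd, hym, hprod⟩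
  have hLpair : L.Pairwise (· < ·) := by
    rw [hLdef, List.pairwise_map]
    refine List.Pairwise.imp_of_mem ?_ hRpair
    intro a b ha hb hab
    obtain ⟨ha2, -, -, -, hap⟩ := hcof a ha
    obtain ⟨hb2, -, -, -, hbp⟩ := hcof b hb
    obtain ⟨hb2', -, -⟩ := (hRmem b).mp hb
    by_contra h
    rw [not_lt] at h
    have h1 : PySem.Int.floordiv n b * b ≤ PySem.Int.floordiv n a * b :=
      mul_le_mul_of_nonneg_right h (by omega)
    have h2 : PySem.Int.floordiv n a * b < PySem.Int.floordiv n a * a :=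
      mul_lt_mul_of_pos_left hab (by omega)
    omega
  have hSL : (S ++ L).Pairwise (· < ·) := by
    rw [List.pairwise_append]
    refine ⟨hSpair, hLpair, fun x hx y hy => ?_⟩
    obtain ⟨hx2, hxsq, -⟩ := (hSmem x).mp hx
    rw [hLdef, List.mem_map] at hy
    obtain ⟨e, he, rfl⟩ := hy
    obtain ⟨hy2, hey, -, -, hprod⟩ := hcof e he
    obtain ⟨he2, hesq, -⟩ := (hRmem e).mp he
    nlinarith
  -- both sides have the same members
  have hmemeq : ∀ x, x ∈ divsIn n 2 m ↔ x ∈ S ++ L := by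
    intro x
    rw [mem_divsIn, List.mem_append, hSmem x, hLdef, List.mem_map]
    constructor
    · rintro ⟨hx2, hxm, hxmod⟩
      have hxd : x ∣ n := (PySem.Int.mod_eq_zero_iff_dvd n x).mp hxmod
      by_cases hxx : x * x ≤ n
      · exact Or.inl ⟨hx2, hxx, hxmod⟩
      · set e := PySem.Int.floordiv n x with hedef
        have hprod : e * x = n := floordiv_mul_of_dvd (by omega) hxd
        have he0 : 0 < e := by nlinarith
        have hex : e < x := by nlinarith
        have hxP : x * P ≤ m * P := mul_le_mul_of_nonneg_right hxm (by omega)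
        have heP : P ≤ e := by nlinarith
        have hed : e ∣ n := ⟨x, hprod.symm⟩
        have heR : e ∈ R := (hRmem e).mpr ⟨by omega, by nlinarith, hed⟩
        have h2 : PySem.Int.floordiv n e * e = x * e := by
          rw [floordiv_mul_of_dvd he0 hed, ← hprod]; ring
        exact Or.inr ⟨e, heR, mul_right_cancel₀ (by omega : e ≠ 0) h2⟩
    · rintro (⟨hx2, hxsq, hxmod⟩ | ⟨e, he, rfl⟩)
      · have hxd : x ∣ n := (PySem.Int.mod_eq_zero_iff_dvd n x).mp hxmod
        have hPx : P ≤ x := hPle x hx2 hxd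
        refine ⟨hx2, by nlinarith, hxmod⟩
      · obtain ⟨hy2, -, hyd, hym, -⟩ := hcof e he
        exact ⟨hy2, hym, (PySem.Int.mod_eq_zero_iff_dvd n _).mpr hyd⟩
  have hkey : divsIn n 2 m = S ++ L :=
    sorted_lt_ext _ _ (pairwise_divsIn n 2 m) hSL hmemeq
  show allfacts n = allfacts_alt n
  rw [allfacts, allfacts_alt]
  simp only [← hSdef, ← hRdef, ← hLdef, hA, ← hA2, hkey]
  simp
-- the prime case: A duplicates n, B does not
theorem prime_case {n : Int} (hn2 : 2 ≤ n) (hnp : Nat.Prime n.toNat) :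
    allfacts n = ([1] ++ [n]) ++ [n] ∧ allfacts_alt n = ([1] ++ [n]) := by
  have htn : ((n.toNat : Int)) = n := Int.toNat_of_nonneg (by omega)
  have hnodvd : ∀ x : Int, 2 ≤ x → x < n → ¬ x ∣ n := by
    intro x hx2 hxn hxd
    have hx : (x.toNat : Int) ∣ (n.toNat : Int) := by
      rwa [Int.toNat_of_nonneg (by omega : (0:Int) ≤ x), htn]
    rcases (Nat.Prime.eq_one_or_self_of_dvd hnp _ (Int.natCast_dvd_natCast.mp hx)) with h | h
    · omega
    · omega
  constructor
  · have hA : allfactsLoop (n + 1 - 2).toNat n 2 [] 0 =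
        n :: allfactsLoop (n - n).toNat n (n + 1) [] (PySem.Int.floordiv n n) := by
      apply allfactsLoop_zero n hn2 le_rfl
        ((PySem.Int.mod_eq_zero_iff_dvd n n).mpr dvd_rfl)
        (fun x hx2 hxn hmod =>
          hnodvd x hx2 hxn ((PySem.Int.mod_eq_zero_iff_dvd n x).mp hmod))
        (n - 2).toNat (n + 1 - 2).toNat 2 rfl rfl (by omega) hn2
    have hA1 : allfactsLoop 0 n (n + 1) [] (PySem.Int.floordiv n n) = [] := rfl
    rw [allfacts]
    simp [hA, hA1]
  · have hS : (PySem.List.pyRange 2 (isqrtLoop n.toNat n 1 + 1) 1).filter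
        (fun d => PySem.Int.mod n d = 0) = [] := by
      rw [List.eq_nil_iff_forall_not_mem]
      intro x hx
      obtain ⟨hx2, hxsq, hxmod⟩ := (mem_small n x).mp hx
      have hxd : x ∣ n := (PySem.Int.mod_eq_zero_iff_dvd n x).mp hxmod
      have hxn : x < n := by nlinarith
      exact hnodvd x hx2 hxn hxd
    rw [allfacts_alt]
    simp [hS]

-- ===== VERDICT (by name: the statement is the Claim_ definition above) =====
theorem allfacts_spec : Claim_unchanged_allfacts := by
  intro n _ hD
  show allfacts n = allfacts_alt n
  by_cases h1 : n ≤ 1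
  · exact small_case h1
  · have hn2 : 2 ≤ n := by omega
    have hnp : ¬ Nat.Prime n.toNat := fun hp => hD ⟨hn2, hp⟩
    exact composite_case hn2 hnp

theorem allfacts_changed : Claim_changed_allfacts := by
  unfold Claim_changed_allfacts
  refine ⟨by decide, by decide, ?_, ?_, by decide⟩
  · rcases prime_case (n := 5) (by norm_num) (by decide) with ⟨h, -⟩
    simpa using h
  · rcases prime_case (n := 5) (by norm_num) (by decide) with ⟨-, h⟩
    simpa using h

theorem allfacts_tight : Claim_exact_allfacts := by
  intro n _ hD heq
  obtain ⟨hn2, hp⟩ := hD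
  obtain ⟨hA, hB⟩ := prime_case hn2 hp
  rw [hA, hB] at heq
  simpa using congrArg List.length heq
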